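-- pv_equiv track=rewrite | github.com/Jeniya1378/Information_Retrieval | Assignment 2/HW02_sultana.py | query_token_set_op
-- ===== SOURCE A (Python) =====
-- def query_token_set_op(query_sets):
--     num_of_op = len(query_sets) - 1   #num of AND/OR operations
--     results = []  # List to store results
--
--     # Generate binary numbers of appropriate length (representing AND/OR combinations)
--     for i in range(2**num_of_op):
--         binary = bin(i)[2:].zfill(num_of_op)  # generate binary number
--         token = list(query_sets.keys())[0]   # first token with set of doc id
--         result_set = query_sets[token]   #initialize with the first set
--         tokens_used = [token]  # List to store tokens used in this combination
--
--         for j, op in enumerate(binary):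
--             token = list(query_sets.keys())[j+1]  #iterate through the tokens of the query
--             tokens_used.append(token)
--
--             if op == '0':  # AND operation
--                 result_set = result_set.intersection(query_sets[token])
--             elif op == '1':  # OR operation
--                 result_set = result_set.union(query_sets[token])
--
--         # Append the tuple to the results list
--         results.append((binary, tokens_used, result_set))
--
--     return results
-- ===== SOURCE B (Python) =====
-- def query_token_set_op(query_sets):
--     # Prefix-sharing DFS over the tokens: each AND/OR partial result is computed
--     # once and shared by all combinations that extend it, instead of being
--     # refolded from scratch for every binary number.
--     items = list(query_sets.items())
--     n = len(items)
--     results = []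
--
--     def go(j, binary, tokens, acc):
--         if j == n:
--             results.append((binary, tokens, acc))
--             return
--         tok, s = items[j]
--         go(j + 1, binary + '0', tokens + [tok], acc & s)
--         go(j + 1, binary + '1', tokens + [tok], acc | s)
--
--     tok0, s0 = items[0]
--     go(1, '', [tok0], s0)
--     return results
-- ===== Notes on version B (the rewrite author's own statement) =====
-- stated objective: alternative
-- what changed: Replaces the enumerate-all-binary-numbers loop (which rebuilds the key list and refolds the whole AND/OR chain for every combination) by a depth-first prefix-sharing recursion over the tokens that reuses each partial intersection/union for both of its extensions; on a single-token or empty dict, where A raises, those inputs are outside Pre_ (B raises on the empty dict too, and returns the trivial combination on one token).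
-- outside the precondition, e.g. on query_token_set_op({}): A raises TypeError, B raises IndexError; on query_token_set_op({'x': {1, 2}}): A raises IndexError, B returns [('', ['x'], {1, 2})]
import Mathlib
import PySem

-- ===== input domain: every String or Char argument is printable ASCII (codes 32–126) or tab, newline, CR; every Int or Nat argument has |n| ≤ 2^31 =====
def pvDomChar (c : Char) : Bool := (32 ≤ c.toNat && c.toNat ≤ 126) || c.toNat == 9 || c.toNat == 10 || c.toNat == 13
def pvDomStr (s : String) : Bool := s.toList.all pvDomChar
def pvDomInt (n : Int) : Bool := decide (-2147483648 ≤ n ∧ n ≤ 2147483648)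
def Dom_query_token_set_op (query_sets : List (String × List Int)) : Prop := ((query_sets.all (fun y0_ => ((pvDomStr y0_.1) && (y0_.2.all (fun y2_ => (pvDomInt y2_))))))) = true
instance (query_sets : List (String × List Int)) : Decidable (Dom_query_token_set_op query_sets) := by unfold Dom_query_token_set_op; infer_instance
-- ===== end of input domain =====

-- B replaces A's per-combination refolding (rebuilding the key list and the whole
-- AND/OR chain for every binary number) by a prefix-sharing DFS over the tokens.


-- Shared input decoding: the argument is a Python dict mapping tokens to SETS of
-- doc ids, so the association list is decoded once into a PySem.Dict of PySem.Sets.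
def pvDict (query_sets : List (String × List Int)) : PySem.Dict String (List Int) :=
  PySem.Dict.ofList (query_sets.map (fun p => (p.1, PySem.Set.ofList p.2)))

-- ===== PORT A =====
-- Literal transliteration of A.  `list(query_sets.keys())[0]` / `[j+1]` raise
-- IndexError where pyGet? is none — those inputs (fewer than two keys) are
-- excluded by Pre_, so the `.getD` defaults are never reached there; likewise
-- `2**num_of_op` with num_of_op = -1 (empty dict) is outside Pre_.
def query_token_set_op (query_sets : List (String × List Int)) : List (String × List String × List Int) :=
  let d := pvDict query_sets
  let numOfOp : Int := (d.size : Int) - 1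
  (PySem.List.pyRange 0 ((2 : Int) ^ numOfOp.toNat) 1).foldl (fun results i =>
    -- binary = bin(i)[2:].zfill(num_of_op)
    let binary : List Char :=
      PySem.Chars.zfill (PySem.List.slice (PySem.Int.pyBin i).toList (some 2) none) numOfOp
    let token0 := ((PySem.List.pyGet? d.keys 0).getD "")
    let resultSet0 := d.getD token0 []
    let st := (PySem.List.enumerate binary 0).foldl (fun (st : List Int × List String) jop =>
      let token := ((PySem.List.pyGet? d.keys (jop.1 + 1)).getD "")
      let toks := st.2 ++ [token]
      if jop.2 = '0' then (PySem.Set.inter st.1 (d.getD token []), toks)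
      else if jop.2 = '1' then (PySem.Set.union st.1 (d.getD token []), toks)
      else (st.1, toks)) (resultSet0, [token0])
    results ++ [(String.ofList binary, st.2, st.1)]) []

-- ===== PORT B =====
-- DFS over the remaining tokens; each call appends both extensions of its prefix.
def qtsoGo (rest : List (String × List Int)) (binary : List Char) (tokens : List String)
    (acc : List Int) : List (String × List String × List Int) :=
  match rest with
  | [] => [(String.ofList binary, tokens, acc)]
  | (tok, s) :: r =>
      qtsoGo r (binary ++ ['0']) (tokens ++ [tok]) (PySem.Set.inter acc s) ++
      qtsoGo r (binary ++ ['1']) (tokens ++ [tok]) (PySem.Set.union acc s)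

def query_token_set_op_alt (query_sets : List (String × List Int)) : List (String × List String × List Int) :=
  match (pvDict query_sets).items with
  | [] => []  -- Source B raises IndexError on an empty dict; outside Pre_
  | (t0, s0) :: rest => qtsoGo rest [] [t0] s0

-- ===== PRECONDITION & SPEC =====
-- A raises IndexError whenever the dict has fewer than two (distinct) keys:
-- with no keys `keys[0]` fails (after `range(2**-1)` fails), with one key the
-- inner loop still runs once ('0'.zfill(0) = '0') and indexes a missing second key.
def Pre_query_token_set_op (query_sets : List (String × List Int)) : Prop :=
  2 ≤ (PySem.Set.ofList (query_sets.map Prod.fst)).length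
instance (query_sets : List (String × List Int)) : Decidable (Pre_query_token_set_op query_sets) := by
  unfold Pre_query_token_set_op; infer_instance

def pvWitness_query_token_set_op : (List (String × List Int)) := [("a", [1]), ("b", [2])]

def Spec_query_token_set_op (query_sets : List (String × List Int)) (out : List (String × List String × List Int)) : Prop := out = query_token_set_op_alt query_sets
instance (query_sets : List (String × List Int)) (out : List (String × List String × List Int)) : Decidable (Spec_query_token_set_op query_sets out) := by unfold Spec_query_token_set_op; infer_instance

-- ===== CLAIM (what is proved, stated in full; the proofs are below) =====
def Claim_equal_query_token_set_op : Prop := ∀ (query_sets : List (String × List Int)), Dom_query_token_set_op query_sets → Pre_query_token_set_op query_sets → Spec_query_token_set_op query_sets (query_token_set_op query_sets)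

-- ===== LEMMAS AND PROOFS =====

-- the j-th AND/OR combination as an n-bit string, most significant bit first
def natToBits : Nat → Nat → List Char
  | 0, _ => []
  | n + 1, i => (if i / 2 ^ n = 1 then '1' else '0') :: natToBits n (i % 2 ^ n)

-- all n-bit strings in lexicographic (= numeric) order
def allBits : Nat → List (List Char)
  | 0 => [[]]
  | n + 1 => (allBits n).map ('0' :: ·) ++ (allBits n).map ('1' :: ·)

-- fold one AND/OR chain over the remaining (token, set) pairs
def applyOps : List Int → List (String × List Int) → List Char → List Int
  | acc, _, [] => acc
  | acc, [], _ :: _ => acc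
  | acc, (_, s) :: r, c :: cs =>
      applyOps (if c = '0' then PySem.Set.inter acc s
                else if c = '1' then PySem.Set.union acc s else acc) r cs

theorem length_natToBits (n i : Nat) : (natToBits n i).length = n := by
  induction n generalizing i with
  | zero => rfl
  | succ n ih => simp [natToBits, ih]

theorem goLemma (rest : List (String × List Int)) :
    ∀ (pre : List Char) (toks : List String) (acc : List Int),
    qtsoGo rest pre toks acc =
      (allBits rest.length).map (fun bs =>
        (String.ofList (pre ++ bs), toks ++ rest.map Prod.fst, applyOps acc rest bs)) := by
  induction rest with
  | nil => intro pre toks acc; simp [qtsoGo, allBits, applyOps]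
  | cons p r ih =>
    intro pre toks acc
    obtain ⟨tok, s⟩ := p
    simp only [qtsoGo, ih, List.length_cons, allBits, List.map_append, List.map_map]
    congr 1 <;> apply List.map_congr_left <;> intro bs _ <;>
      simp [applyOps, Function.comp, List.append_assoc]

theorem rangeBits (n : Nat) :
    (List.range (2 ^ n)).map (fun i => natToBits n i) = allBits n := by
  induction n with
  | zero => simp [natToBits, allBits]
  | succ n ih =>
    have h2 : 2 ^ (n + 1) = 2 ^ n + 2 ^ n := by ring
    rw [h2, List.range_add, List.map_append, List.map_map]
    have hl : (List.range (2 ^ n)).map (fun i => natToBits (n + 1) i)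
        = (List.range (2 ^ n)).map (fun i => '0' :: natToBits n i) := by
      apply List.map_congr_left
      intro i hi
      rw [List.mem_range] at hi
      simp [natToBits, Nat.div_eq_of_lt hi, Nat.mod_eq_of_lt hi]
    have hr : (List.range (2 ^ n)).map ((fun i => natToBits (n + 1) i) ∘ (fun i => 2 ^ n + i))
        = (List.range (2 ^ n)).map (fun i => '1' :: natToBits n i) := by
      apply List.map_congr_left
      intro i hi
      rw [List.mem_range] at hi
      have hd : (2 ^ n + i) / 2 ^ n = 1 := by
        rw [Nat.add_comm, Nat.add_div_right _ (Nat.two_pow_pos n),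
          Nat.div_eq_of_lt hi]
      have hm : (2 ^ n + i) % 2 ^ n = i := by
        rw [Nat.add_comm, Nat.add_mod_right, Nat.mod_eq_of_lt hi]
      simp [Function.comp, natToBits, hd, hm]
    rw [hl, hr]
    simp [allBits, ← ih, List.map_map, Function.comp_def]

-- ---- Nat.toDigits 2 : structural recursion, extracted from the fuelled core ----

theorem toDigitsCore_acc (b : Nat) :
    ∀ (f n : Nat) (acc : List Char),
    Nat.toDigitsCore b f n acc = Nat.toDigitsCore b f n [] ++ acc := by
  intro f
  induction f with
  | zero => intro n acc; simp [Nat.toDigitsCore]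
  | succ f ih =>
    intro n acc
    simp only [Nat.toDigitsCore]
    by_cases h : n / b = 0
    · simp [h]
    · simp only [h, if_false]
      rw [ih (n / b) [(n % b).digitChar], ih (n / b) ((n % b).digitChar :: acc)]
      simp

theorem toDigitsCore_fuel :
    ∀ (n f f' : Nat), n < f → n < f' →
    Nat.toDigitsCore 2 f n [] = Nat.toDigitsCore 2 f' n [] := by
  intro n
  induction n using Nat.strong_induction_on with
  | _ n ih =>
    intro f f' hf hf'
    obtain ⟨g, rfl⟩ : ∃ g, f = g + 1 := ⟨f - 1, by omega⟩
    obtain ⟨g', rfl⟩ : ∃ g', f' = g' + 1 := ⟨f' - 1, by omega⟩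
    simp only [Nat.toDigitsCore]
    by_cases h : n / 2 = 0
    · simp [h]
    · simp only [h, if_false]
      have hn2 : n / 2 < n := Nat.div_lt_self (by omega) (by omega)
      rw [toDigitsCore_acc 2 g, toDigitsCore_acc 2 g',
        ih (n / 2) hn2 g (g' + 1) (by omega) (by omega),
        ih (n / 2) hn2 (g' + 1) g' (by omega) (by omega)]

theorem toDigits_two_rec (i : Nat) (h : 2 ≤ i) :
    Nat.toDigits 2 i = Nat.toDigits 2 (i / 2) ++ [if i % 2 = 1 then '1' else '0'] := by
  have hd : (i % 2).digitChar = if i % 2 = 1 then '1' else '0' := by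
    rcases Nat.mod_two_eq_zero_or_one i with h2 | h2 <;> simp [h2, Nat.digitChar]
  have hne : i / 2 ≠ 0 := by omega
  show Nat.toDigitsCore 2 (i + 1) i [] = _
  simp only [Nat.toDigitsCore, hne, if_false]
  rw [toDigitsCore_acc, toDigitsCore_fuel (i / 2) i (i / 2 + 1) (by omega) (by omega), hd]
  rfl

theorem toDigits_two_head (m : Nat) :
    ∃ c cs, Nat.toDigits 2 m = c :: cs ∧ (c = '0' ∨ c = '1') := by
  induction m using Nat.strong_induction_on with
  | _ m ih =>
    by_cases h : 2 ≤ m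
    · obtain ⟨c, cs, hc, hor⟩ := ih (m / 2) (Nat.div_lt_self (by omega) (by omega))
      exact ⟨c, cs ++ [if m % 2 = 1 then '1' else '0'], by rw [toDigits_two_rec m h, hc]; rfl, hor⟩
    · interval_cases m
      · exact ⟨'0', [], rfl, Or.inl rfl⟩
      · exact ⟨'1', [], rfl, Or.inr rfl⟩

theorem zfill_toDigits (m n : Nat) (hn : 1 ≤ n) :
    PySem.Chars.zfill (Nat.toDigits 2 m) n
      = List.replicate (n - (Nat.toDigits 2 m).length) '0' ++ Nat.toDigits 2 m := by
  obtain ⟨c, cs, hc, hor⟩ := toDigits_two_head m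
  rw [hc]
  by_cases hw : (n : Int) ≤ ((c :: cs).length : Int)
  · rw [PySem.Chars.zfill, if_pos hw]
    have hw' : n ≤ cs.length + 1 := by
      have h2 : (n : Int) ≤ (cs.length : Int) + 1 := by simpa using hw
      exact_mod_cast h2
    simp [Nat.sub_eq_zero_of_le hw']
  · have hcn : ¬ (c = '+' ∨ c = '-') := by rcases hor with h | h <;> simp [h]
    simp [PySem.Chars.zfill, hcn]
    intro hcontra
    exact absurd hcontra (by simpa using hw)

theorem natToBits_succ_append (n : Nat) :
    ∀ i : Nat, i < 2 ^ (n + 1) →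
    natToBits (n + 1) i = natToBits n (i / 2) ++ [if i % 2 = 1 then '1' else '0'] := by
  induction n with
  | zero =>
    intro i hi
    interval_cases i <;> decide
  | succ n ihn =>
    intro i hi
    have hsplit : natToBits (n + 2) i
        = (if i / 2 ^ (n + 1) = 1 then '1' else '0') :: natToBits (n + 1) (i % 2 ^ (n + 1)) := rfl
    have h1 : (i / 2) / 2 ^ n = i / 2 ^ (n + 1) := by
      rw [Nat.div_div_eq_div_mul, pow_succ']
    have hlt : i % 2 ^ (n + 1) < 2 ^ (n + 1) := Nat.mod_lt _ (Nat.two_pow_pos _)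
    have h2 : (i % 2 ^ (n + 1)) / 2 = (i / 2) % 2 ^ n := by
      have h : (2 : Nat) ^ (n + 1) = 2 * 2 ^ n := by rw [pow_succ']
      rw [h, Nat.mod_mul_right_div_self]
    have h3 : (i % 2 ^ (n + 1)) % 2 = i % 2 := by
      apply Nat.mod_mod_of_dvd
      exact ⟨2 ^ n, by rw [pow_succ']⟩
    have hrec := ihn (i % 2 ^ (n + 1)) hlt
    rw [h2, h3] at hrec
    rw [hsplit, hrec]
    show (if i / 2 ^ (n + 1) = 1 then '1' else '0') :: (natToBits n ((i / 2) % 2 ^ n)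
        ++ [if i % 2 = 1 then '1' else '0'])
      = (if (i / 2) / 2 ^ n = 1 then '1' else '0') :: natToBits n ((i / 2) % 2 ^ n)
        ++ [if i % 2 = 1 then '1' else '0']
    simp [h1]

theorem zfill_bin (n : Nat) (hn : 1 ≤ n) :
    ∀ i : Nat, i < 2 ^ n → PySem.Chars.zfill (Nat.toDigits 2 i) n = natToBits n i := by
  induction n, hn using Nat.le_induction with
  | base =>
    intro i hi
    interval_cases i <;> decide
  | succ n hn ih =>
    intro i hi
    have key : PySem.Chars.zfill (Nat.toDigits 2 i) ((n + 1 : Nat) : Int)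
        = PySem.Chars.zfill (Nat.toDigits 2 (i / 2)) n ++ [if i % 2 = 1 then '1' else '0'] := by
      rw [zfill_toDigits i (n + 1) (by omega), zfill_toDigits (i / 2) n hn]
      by_cases h2 : 2 ≤ i
      · rw [toDigits_two_rec i h2]
        simp only [List.length_append, List.length_singleton, List.append_assoc]
        congr 2
        omega
      · interval_cases i
        · show List.replicate (n + 1 - 1) '0' ++ ['0']
            = (List.replicate (n - 1) '0' ++ ['0']) ++ ['0']
          have : List.replicate (n + 1 - 1) '0' = List.replicate (n - 1) '0' ++ ['0'] := by
            have : n + 1 - 1 = (n - 1) + 1 := by omega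
            rw [this, List.replicate_succ']
          rw [this, List.append_assoc]
        · show List.replicate (n + 1 - 1) '0' ++ ['1']
            = (List.replicate (n - 1) '0' ++ ['0']) ++ ['1']
          have : List.replicate (n + 1 - 1) '0' = List.replicate (n - 1) '0' ++ ['0'] := by
            have : n + 1 - 1 = (n - 1) + 1 := by omega
            rw [this, List.replicate_succ']
          rw [this, List.append_assoc]
    rw [key, ih (i / 2) (by omega), ← natToBits_succ_append n i hi]

-- A's inner loop body, named so that the fold can be rewritten step by step
def stepA (d : PySem.Dict String (List Int)) (st : List Int × List String)
    (jop : Int × Char) : List Int × List String :=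
  let token := ((PySem.List.pyGet? d.keys (jop.1 + 1)).getD "")
  let toks := st.2 ++ [token]
  if jop.2 = '0' then (PySem.Set.inter st.1 (d.getD token []), toks)
  else if jop.2 = '1' then (PySem.Set.union st.1 (d.getD token []), toks)
  else (st.1, toks)

-- A's inner enumerate-fold, related to applyOps on the remaining pairs
theorem foldA (d : PySem.Dict String (List Int)) (t0 : String) (s0 : List Int)
    (rest : List (String × List Int)) (h : d.items = (t0, s0) :: rest)
    (hnd : d.keys.Nodup) :
    ∀ (cs : List Char) (pre suf : List (String × List Int)) (acc : List Int) (toks : List String),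
    rest = pre ++ suf → cs.length ≤ suf.length →
    (PySem.List.enumerate cs ((pre.length : Nat) : Int)).foldl (stepA d) (acc, toks)
      = (applyOps acc suf cs, toks ++ (suf.take cs.length).map Prod.fst) := by
  intro cs
  induction cs with
  | nil =>
    intro pre suf acc toks _ _
    simp [PySem.List.enumerate, applyOps]
  | cons c cs ih =>
    intro pre suf acc toks hps hlen
    obtain ⟨⟨tk, s⟩, suf', rfl⟩ : ∃ p suf', suf = p :: suf' := by
      cases suf with
      | nil => simp at hlen
      | cons p suf' => exact ⟨p, suf', rfl⟩
    have hkeys : d.keys = (t0 :: pre.map Prod.fst) ++ tk :: suf'.map Prod.fst := by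
      simp [PySem.Dict.keys, h, hps]
    have htok : (PySem.List.pyGet? d.keys (((pre.length : Nat) : Int) + 1)).getD "" = tk := by
      rw [hkeys]
      have hlen' : (((pre.length : Nat) : Int) + 1) = (((t0 :: pre.map Prod.fst).length : Nat) : Int) := by
        push_cast [List.length_cons, List.length_map]; ring
      rw [hlen', PySem.List.pyGet?_append_length]
      rfl
    have hmem : (tk, s) ∈ d.items := by rw [h, hps]; simp
    have hget : d.getD tk [] = s := PySem.Dict.getD_of_mem_items d hmem hnd []
    have henum : PySem.List.enumerate (c :: cs) ((pre.length : Nat) : Int)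
        = (((pre.length : Nat) : Int), c) :: PySem.List.enumerate cs (((pre.length : Nat) : Int) + 1) := rfl
    rw [henum, List.foldl_cons]
    have hstep : stepA d (acc, toks) (((pre.length : Nat) : Int), c)
        = ((if c = '0' then PySem.Set.inter acc s
            else if c = '1' then PySem.Set.union acc s else acc), toks ++ [tk]) := by
      simp only [stepA, htok, hget]
      split_ifs <;> rfl
    rw [hstep]
    have hcast : (((pre.length : Nat) : Int) + 1) = (((pre ++ [(tk, s)]).length : Nat) : Int) := by
      push_cast [List.length_append, List.length_cons, List.length_nil]; ring
    rw [hcast, ih (pre ++ [(tk, s)]) suf' _ _ (by simp [hps]) (by simpa using hlen)]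
    simp [applyOps, List.take_succ_cons, List.append_assoc]

-- the body of A's outer loop, one combination per binary number i
def abody (d : PySem.Dict String (List Int)) (i : Int) : String × List String × List Int :=
  let binary : List Char :=
    PySem.Chars.zfill (PySem.List.slice (PySem.Int.pyBin i).toList (some 2) none) ((d.size : Int) - 1)
  let token0 := ((PySem.List.pyGet? d.keys 0).getD "")
  let resultSet0 := d.getD token0 []
  let st := (PySem.List.enumerate binary 0).foldl (stepA d) (resultSet0, [token0])
  (String.ofList binary, st.2, st.1)

-- A, on a dict with items (t0,s0)::rest (rest nonempty), equals B's DFS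
theorem A_eq (d : PySem.Dict String (List Int)) (t0 : String) (s0 : List Int)
    (rest : List (String × List Int)) (h : d.items = (t0, s0) :: rest)
    (hnd : d.keys.Nodup) (hn : 1 ≤ rest.length) :
    (PySem.List.pyRange 0 ((2 : Int) ^ (((d.size : Int) - 1).toNat)) 1).foldl
      (fun results i => results ++ [abody d i]) []
    = qtsoGo rest [] [t0] s0 := by
  have hsize : d.size = rest.length + 1 := by simp [PySem.Dict.size, h]
  have hnum : ((d.size : Int) - 1) = (rest.length : Int) := by rw [hsize]; push_cast; ring
  have hnumt : ((d.size : Int) - 1).toNat = rest.length := by rw [hnum]; exact Int.toNat_natCast _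
  have hcast2 : ((2 : Int) ^ rest.length) = ((2 ^ rest.length : Nat) : Int) := by push_cast; ring
  rw [PySem.List.foldl_append_singleton_eq_map (abody d), hnumt, hcast2,
    PySem.List.pyRange_zero_natCast, List.map_map, List.nil_append]
  have hkeys : d.keys = t0 :: rest.map Prod.fst := by simp [PySem.Dict.keys, h]
  have htok0 : ((PySem.List.pyGet? d.keys 0).getD "") = t0 := by
    rw [hkeys, PySem.List.pyGet?_zero_cons]; rfl
  have hs0 : d.getD t0 [] = s0 :=
    PySem.Dict.getD_of_mem_items d (by rw [h]; exact List.mem_cons_self) hnd []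
  have habody : ∀ k ∈ List.range (2 ^ rest.length), (abody d ∘ fun k : Nat => (k : Int)) k
      = (String.ofList (natToBits rest.length k), t0 :: rest.map Prod.fst,
          applyOps s0 rest (natToBits rest.length k)) := by
    intro k hk
    rw [List.mem_range] at hk
    have hbin : PySem.Chars.zfill
        (PySem.List.slice (PySem.Int.pyBin ((k : Nat) : Int)).toList (some 2) none)
        ((d.size : Int) - 1) = natToBits rest.length k := by
      have h0b : (PySem.Int.pyBin ((k : Nat) : Int)).toList = '0' :: 'b' :: Nat.toDigits 2 k := by
        rw [PySem.Int.toList_pyBin]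
        simp [PySem.Int.toBinChars0b]
      rw [h0b, PySem.List.slice_from _ (by norm_num : (0 : Int) ≤ 2)]
      show PySem.Chars.zfill (Nat.toDigits 2 k) ((d.size : Int) - 1) = _
      rw [hnum]
      exact zfill_bin rest.length hn k hk
    have hfold := foldA d t0 s0 rest h hnd (natToBits rest.length k) [] rest s0 [t0]
      (by simp) (by simp [length_natToBits])
    simp only [List.length_nil, Nat.cast_zero, length_natToBits, List.take_length,
      List.nil_append] at hfold
    simp only [Function.comp_apply, abody, hbin, htok0, hs0, hfold]
    rfl
  rw [List.map_congr_left habody]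
  have : (fun k : Nat => (String.ofList (natToBits rest.length k), t0 :: rest.map Prod.fst,
      applyOps s0 rest (natToBits rest.length k)))
      = ((fun bs => (String.ofList bs, t0 :: rest.map Prod.fst, applyOps s0 rest bs))
          ∘ fun k => natToBits rest.length k) := rfl
  rw [this, ← List.map_map, rangeBits, goLemma]
  simp

-- ===== VERDICT (by name: the statement is the Claim_ definition above) =====
theorem query_token_set_op_spec : Claim_equal_query_token_set_op := by
  intro qs _ hpre
  unfold Spec_query_token_set_op
  have hnd : (pvDict qs).keys.Nodup := PySem.Dict.nodup_keys_ofList _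
  have hkeys : (pvDict qs).keys = PySem.Set.ofList (qs.map Prod.fst) := by
    show (PySem.Dict.empty.update ((qs.map (fun p => (p.1, PySem.Set.ofList p.2))))).keys = _
    rw [PySem.Dict.update, PySem.Dict.keys_foldl_insert_key _ Prod.fst (fun _ x => x.2)]
    simp [PySem.Set.update_nil_left, List.map_map, Function.comp_def]
  unfold Pre_query_token_set_op at hpre
  have hlen2 : 2 ≤ (pvDict qs).items.length := by
    have : (pvDict qs).keys.length = (pvDict qs).items.length := by
      simp [PySem.Dict.keys]
    rw [hkeys] at this
    omega
  rcases hI : (pvDict qs).items with _ | ⟨⟨t0, s0⟩, rest⟩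
  · rw [hI] at hlen2; simp at hlen2
  · have hrest : 1 ≤ rest.length := by rw [hI] at hlen2; simp at hlen2; omega
    have hA : query_token_set_op qs = qtsoGo rest [] [t0] s0 := by
      show (PySem.List.pyRange 0 ((2 : Int) ^ ((((pvDict qs).size : Int) - 1).toNat)) 1).foldl
        (fun results i => results ++ [abody (pvDict qs) i]) [] = _
      exact A_eq (pvDict qs) t0 s0 rest hI hnd hrest
    have hB : query_token_set_op_alt qs = qtsoGo rest [] [t0] s0 := by
      simp only [query_token_set_op_alt, hI]
    rw [hA, hB]
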